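-- pv_equiv track=rewrite | github.com/kejjang/advent-of-code-2020 | machines/day17.py | __copy_state_4d
-- ===== SOURCE A (Python) =====
-- from collections import defaultdict
--
-- def __copy_state_4d(from_state):
--     new_state = defaultdict(lambda: defaultdict(lambda: defaultdict(lambda: defaultdict(lambda: "."))))
--     for x in from_state:
--         for y in from_state[x]:
--             for z in from_state[x][y]:
--                 for w in from_state[x][y][z]:
--                     new_state[x][y][z][w] = from_state[x][y][z][w]
--     return new_state
-- ===== SOURCE B (Python) =====
-- def __copy_state_4d(from_state):
--     # recursive rebuild: plain dicts, keep an entry only if its copied subtree is non-empty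
--     def copy(level, depth):
--         if depth == 1:
--             return dict(level)
--         out = {}
--         for key, value in level.items():
--             child = copy(value, depth - 1)
--             if child:
--                 out[key] = child
--         return out
--     return copy(from_state, 4)
-- ===== Notes on version B (the rewrite author's own statement) =====
-- stated objective: simpler
-- what changed: Replaces the four nested loops with defaultdict autovivification by a recursive depth-indexed rebuild using plain dicts that keeps an entry only when its copied subtree is non-empty (A returns a defaultdict, B a plain dict with the same contents).
import Mathlib
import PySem

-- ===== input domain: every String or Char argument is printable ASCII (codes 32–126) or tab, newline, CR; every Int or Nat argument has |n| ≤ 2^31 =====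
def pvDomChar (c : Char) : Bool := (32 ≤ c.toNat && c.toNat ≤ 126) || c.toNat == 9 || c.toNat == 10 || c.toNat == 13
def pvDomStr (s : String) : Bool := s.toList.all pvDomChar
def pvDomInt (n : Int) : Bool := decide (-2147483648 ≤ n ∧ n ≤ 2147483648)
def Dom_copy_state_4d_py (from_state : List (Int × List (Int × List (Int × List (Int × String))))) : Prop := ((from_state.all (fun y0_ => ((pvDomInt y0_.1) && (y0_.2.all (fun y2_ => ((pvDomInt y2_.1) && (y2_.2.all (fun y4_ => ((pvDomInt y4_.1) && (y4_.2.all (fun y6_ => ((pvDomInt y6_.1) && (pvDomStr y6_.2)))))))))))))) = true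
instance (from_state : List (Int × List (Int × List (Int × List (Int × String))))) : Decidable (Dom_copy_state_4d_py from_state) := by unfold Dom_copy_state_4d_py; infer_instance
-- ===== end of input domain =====

-- B replaces A's four nested loops over a fresh 4-level defaultdict by a recursive depth-indexed
-- rebuild with plain dicts that keeps an entry only when its copied subtree is non-empty; the
-- equivalence is about the returned mapping's contents (A returns a defaultdict, B a plain dict).

-- ===== PORT A =====
-- A iterates dict keys and looks each key up ('for x in from_state: … from_state[x]…');
-- under Pre_ (unique keys at every level, the dict encoding) this is iteration over the pairs.
-- 'new_state[x][y][z][w] = v' on the 4-level defaultdict is the nested Dict.modify with default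
-- Dict.empty at each level (the innermost "." factory is never invoked by A).
def pvA_setW (x y z : Int)
    (ns : PySem.Dict Int (PySem.Dict Int (PySem.Dict Int (PySem.Dict Int String))))
    (wp : Int × String) :
    PySem.Dict Int (PySem.Dict Int (PySem.Dict Int (PySem.Dict Int String))) :=
  ns.modify x PySem.Dict.empty (fun d1 =>
    d1.modify y PySem.Dict.empty (fun d2 =>
      d2.modify z PySem.Dict.empty (fun d3 => d3.insert wp.1 wp.2)))

def pvA_loopW (x y : Int)
    (ns : PySem.Dict Int (PySem.Dict Int (PySem.Dict Int (PySem.Dict Int String))))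
    (zp : Int × List (Int × String)) :
    PySem.Dict Int (PySem.Dict Int (PySem.Dict Int (PySem.Dict Int String))) :=
  zp.2.foldl (pvA_setW x y zp.1) ns

def pvA_loopZ (x : Int)
    (ns : PySem.Dict Int (PySem.Dict Int (PySem.Dict Int (PySem.Dict Int String))))
    (yp : Int × List (Int × List (Int × String))) :
    PySem.Dict Int (PySem.Dict Int (PySem.Dict Int (PySem.Dict Int String))) :=
  yp.2.foldl (pvA_loopW x yp.1) ns

def pvA_loopY
    (ns : PySem.Dict Int (PySem.Dict Int (PySem.Dict Int (PySem.Dict Int String))))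
    (xp : Int × List (Int × List (Int × List (Int × String)))) :
    PySem.Dict Int (PySem.Dict Int (PySem.Dict Int (PySem.Dict Int String))) :=
  xp.2.foldl (pvA_loopZ xp.1) ns

def copy_state_4d_py (from_state : List (Int × List (Int × List (Int × List (Int × String))))) :
    List (Int × List (Int × List (Int × List (Int × String)))) :=
  ((from_state.foldl pvA_loopY PySem.Dict.empty).items.map
    (fun xp => (xp.1, xp.2.items.map
      (fun yp => (yp.1, yp.2.items.map
        (fun zp => (zp.1, zp.2.items)))))))

-- ===== PORT B =====
-- Source B's copy(level, depth): depth 1 returns dict(level) (an assoc-list copy); at larger depths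
-- a fresh dict gains key→child for each pair whose recursively copied child is non-empty.
def pvCopyDepth1 (level : List (Int × String)) : List (Int × String) := level

def pvCopyDepth2 (level : List (Int × List (Int × String))) : List (Int × List (Int × String)) :=
  level.foldl (fun out p =>
    if pvCopyDepth1 p.2 = [] then out else out ++ [(p.1, pvCopyDepth1 p.2)]) []

def pvCopyDepth3 (level : List (Int × List (Int × List (Int × String)))) :
    List (Int × List (Int × List (Int × String))) :=
  level.foldl (fun out p =>
    if pvCopyDepth2 p.2 = [] then out else out ++ [(p.1, pvCopyDepth2 p.2)]) []

def pvCopyDepth4 (level : List (Int × List (Int × List (Int × List (Int × String))))) :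
    List (Int × List (Int × List (Int × List (Int × String)))) :=
  level.foldl (fun out p =>
    if pvCopyDepth3 p.2 = [] then out else out ++ [(p.1, pvCopyDepth3 p.2)]) []

def copy_state_4d_py_alt (from_state : List (Int × List (Int × List (Int × List (Int × String))))) :
    List (Int × List (Int × List (Int × List (Int × String)))) :=
  pvCopyDepth4 from_state

-- ===== PRECONDITION & SPEC =====
-- Pre_ excludes association lists with a duplicate key at some level: they encode no Python dict
-- (A's parameter is a dict, whose keys are unique at every level), so neither behaviour is specified.
def Pre_copy_state_4d_py (from_state : List (Int × List (Int × List (Int × List (Int × String))))) : Prop :=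
  (from_state.map Prod.fst).Nodup ∧
    ∀ xp ∈ from_state, (xp.2.map Prod.fst).Nodup ∧
      ∀ yp ∈ xp.2, (yp.2.map Prod.fst).Nodup ∧
        ∀ zp ∈ yp.2, (zp.2.map Prod.fst).Nodup

instance (from_state : List (Int × List (Int × List (Int × List (Int × String))))) :
    Decidable (Pre_copy_state_4d_py from_state) := by unfold Pre_copy_state_4d_py; infer_instance

def pvWitness_copy_state_4d_py : (List (Int × List (Int × List (Int × List (Int × String))))) :=
  [(0, [(1, [(2, [(3, ".")])]), (-1, [])])]

def Spec_copy_state_4d_py (from_state : List (Int × List (Int × List (Int × List (Int × String)))))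
    (out : List (Int × List (Int × List (Int × List (Int × String))))) : Prop :=
  out = copy_state_4d_py_alt from_state

instance (from_state : List (Int × List (Int × List (Int × List (Int × String)))))
    (out : List (Int × List (Int × List (Int × List (Int × String))))) :
    Decidable (Spec_copy_state_4d_py from_state out) := by
  unfold Spec_copy_state_4d_py
  haveI h2 : DecidableEq (List (Int × String)) := inferInstance
  haveI h4 : DecidableEq (List (Int × List (Int × String))) := inferInstance
  haveI h6 : DecidableEq (List (Int × List (Int × List (Int × String)))) := inferInstance
  haveI h8 : DecidableEq (List (Int × List (Int × List (Int × List (Int × String))))) := inferInstance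
  exact h8 out (copy_state_4d_py_alt from_state)

-- ===== CLAIM (what is proved, stated in full; the proofs are below) =====
def Claim_equal_copy_state_4d_py : Prop :=
  ∀ (from_state : List (Int × List (Int × List (Int × List (Int × String))))),
    Dom_copy_state_4d_py from_state → Pre_copy_state_4d_py from_state →
      Spec_copy_state_4d_py from_state (copy_state_4d_py from_state)

-- ===== LEMMAS AND PROOFS =====

lemma pv_dict_ext {ν : Type} (d d' : PySem.Dict Int ν) (h : d.items = d'.items) : d = d' := by
  cases d; cases d'; simpa [PySem.Dict.items] using h

lemma pv_not_contains_ne {ν : Type} (d : PySem.Dict Int ν) (k : Int) (h : d.contains k = false)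
    (p : Int × ν) (hp : p ∈ d.items) : p.1 ≠ k := by
  simp only [PySem.Dict.contains, List.any_eq_false] at h
  simpa using h p hp

lemma pv_insert_insert {ν : Type} (d : PySem.Dict Int ν) (k : Int) (v1 v2 : ν) :
    (d.insert k v1).insert k v2 = d.insert k v2 := by
  apply pv_dict_ext
  rw [PySem.Dict.items_insert_of_contains _ _ (PySem.Dict.contains_insert_self d k v1)]
  by_cases h : d.contains k = true
  · rw [PySem.Dict.items_insert_of_contains _ _ h, PySem.Dict.items_insert_of_contains _ _ h,
      List.map_map]
    apply List.map_congr_left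
    intro p hp
    by_cases hk : p.1 = k <;> simp [hk]
  · have hf : d.contains k = false := eq_false_of_ne_true h
    rw [PySem.Dict.items_insert_of_not_contains _ _ hf,
      PySem.Dict.items_insert_of_not_contains _ _ hf, List.map_append]
    congr 1
    · conv_rhs => rw [← List.map_id d.items]
      apply List.map_congr_left
      intro p hp
      simp [pv_not_contains_ne d k hf p hp]
    · simp

lemma pv_modify_modify {ν : Type} (d : PySem.Dict Int ν) (k : Int) (e : ν) (g1 g2 : ν → ν) :
    (d.modify k e g1).modify k e g2 = d.modify k e (fun v => g2 (g1 v)) := by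
  simp only [PySem.Dict.modify, PySem.Dict.getD_insert_self, pv_insert_insert]

lemma pv_modify_fresh {ν : Type} (d : PySem.Dict Int ν) (k : Int) (e : ν) (g : ν → ν)
    (h : d.contains k = false) : d.modify k e g = d.insert k (g e) := by
  simp only [PySem.Dict.modify, PySem.Dict.getD_of_not_contains _ _ h]

lemma pv_foldl_modify {β ν : Type} (k : Int) (e : ν) (K : β → ν → ν) :
    ∀ (L : List β) (b0 : β) (ns : PySem.Dict Int ν),
    ((b0 :: L).foldl (fun ns b => ns.modify k e (K b)) ns)
      = ns.modify k e (fun d => L.foldl (fun d b => K b d) (K b0 d)) := by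
  intro L
  induction L with
  | nil => intro b0 ns; simp
  | cons b1 L ih =>
      intro b0 ns
      show ((b1 :: L).foldl _ (ns.modify k e (K b0))) = _
      rw [ih b1 (ns.modify k e (K b0)), pv_modify_modify]
      simp [List.foldl]

lemma pv_gen_fold {α ν : Type} (cond : Int × α → Bool) (G : Int × α → ν)
    (step : PySem.Dict Int ν → (Int × α) → PySem.Dict Int ν)
    (hstep : ∀ ns p, ns.contains p.1 = false →
      step ns p = if cond p then ns else ns.insert p.1 (G p)) :
    ∀ (l : List (Int × α)) (ns : PySem.Dict Int ν), (l.map Prod.fst).Nodup →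
      (∀ p ∈ l, ns.contains p.1 = false) →
      (l.foldl step ns).items
        = ns.items ++ l.filterMap (fun p => if cond p then none else some (p.1, G p)) := by
  intro l
  induction l with
  | nil => intro ns _ _; simp
  | cons p l ih =>
      intro ns hnd hfresh
      have hp : ns.contains p.1 = false := hfresh p (by simp)
      rw [List.foldl_cons, hstep ns p hp]
      by_cases hc : cond p
      · rw [if_pos hc, ih ns (by simpa using hnd.of_cons)
          (fun q hq => hfresh q (List.mem_cons_of_mem _ hq))]
        simp [hc]
      · rw [if_neg hc]
        have hfresh' : ∀ q ∈ l, (ns.insert p.1 (G p)).contains q.1 = false := by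
          intro q hq
          rw [PySem.Dict.contains_insert]
          have hqp : q.1 ≠ p.1 := by
            have h1 : p.1 ∉ l.map Prod.fst :=
              (List.nodup_cons.mp (by simpa using hnd : (p.1 :: l.map Prod.fst).Nodup)).1
            intro hc
            exact h1 (hc ▸ List.mem_map_of_mem hq)
          simp [hqp, hfresh q (List.mem_cons_of_mem _ hq)]
        rw [ih _ (by simpa using hnd.of_cons) hfresh',
          PySem.Dict.items_insert_of_not_contains _ _ hp]
        simp [hc]

lemma pv_foldl_filterMap {α β : Type} (c : α → Prop) [DecidablePred c] (f : α → β) :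
    ∀ (l : List α) (acc : List β),
    l.foldl (fun out p => if c p then out else out ++ [f p]) acc
      = acc ++ l.filterMap (fun p => if c p then none else some (f p)) := by
  intro l
  induction l with
  | nil => intro acc; simp
  | cons p l ih =>
      intro acc
      rw [List.foldl_cons]
      by_cases hc : c p
      · rw [if_pos hc, ih]; simp [hc]
      · rw [if_neg hc, ih]; simp [hc]

-- the step/value functions of A's loops, seen at each inner dict level
def pvGW (zp : Int × List (Int × String)) : PySem.Dict Int String :=
  zp.2.foldl (fun d3 wp => d3.insert wp.1 wp.2) PySem.Dict.empty

def pvStepZ (d2 : PySem.Dict Int (PySem.Dict Int String)) (zp : Int × List (Int × String)) :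
    PySem.Dict Int (PySem.Dict Int String) :=
  zp.2.foldl (fun d2 wp => d2.modify zp.1 PySem.Dict.empty (fun d3 => d3.insert wp.1 wp.2)) d2

def pvGZ (yp : Int × List (Int × List (Int × String))) :
    PySem.Dict Int (PySem.Dict Int String) :=
  yp.2.foldl pvStepZ PySem.Dict.empty

def pvStepY (d1 : PySem.Dict Int (PySem.Dict Int (PySem.Dict Int String)))
    (yp : Int × List (Int × List (Int × String))) :
    PySem.Dict Int (PySem.Dict Int (PySem.Dict Int String)) :=
  yp.2.foldl (fun d1 zp => zp.2.foldl (fun d1 wp =>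
    d1.modify yp.1 PySem.Dict.empty (fun d2 =>
      d2.modify zp.1 PySem.Dict.empty (fun d3 => d3.insert wp.1 wp.2))) d1) d1

def pvGY (xp : Int × List (Int × List (Int × List (Int × String)))) :
    PySem.Dict Int (PySem.Dict Int (PySem.Dict Int String)) :=
  xp.2.foldl pvStepY PySem.Dict.empty

def pvPairsT (yv : List (Int × List (Int × String))) : List (Int × (Int × String)) :=
  yv.flatMap (fun zp => zp.2.map (fun wp => (zp.1, wp)))

def pvTriT (xv : List (Int × List (Int × List (Int × String)))) :
    List (Int × Int × (Int × String)) :=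
  xv.flatMap (fun yp => yp.2.flatMap (fun zp => zp.2.map (fun wp => (yp.1, zp.1, wp))))

lemma pv_hstepZ (d2 : PySem.Dict Int (PySem.Dict Int String)) (zp : Int × List (Int × String))
    (h : d2.contains zp.1 = false) :
    pvStepZ d2 zp = if zp.2.isEmpty then d2 else d2.insert zp.1 (pvGW zp) := by
  obtain ⟨z, zv⟩ := zp
  cases zv with
  | nil => simp [pvStepZ]
  | cons w0 ws =>
      rw [pvStepZ, pv_foldl_modify _ _ (fun wp d3 => d3.insert wp.1 wp.2) ws w0 d2,
        pv_modify_fresh _ _ _ _ h]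
      simp [pvGW]

lemma pv_stepY_flat (d1 : PySem.Dict Int (PySem.Dict Int (PySem.Dict Int String)))
    (yp : Int × List (Int × List (Int × String))) :
    pvStepY d1 yp = (pvPairsT yp.2).foldl (fun d1 t =>
      d1.modify yp.1 PySem.Dict.empty (fun d2 =>
        d2.modify t.1 PySem.Dict.empty (fun d3 => d3.insert t.2.1 t.2.2))) d1 := by
  rw [pvPairsT, List.foldl_flatMap]
  simp only [List.foldl_map]
  rfl

lemma pv_unflatZ (yv : List (Int × List (Int × String)))
    (d0 : PySem.Dict Int (PySem.Dict Int String)) :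
    (pvPairsT yv).foldl (fun d2 t =>
      d2.modify t.1 PySem.Dict.empty (fun d3 => d3.insert t.2.1 t.2.2)) d0
      = yv.foldl pvStepZ d0 := by
  rw [pvPairsT, List.foldl_flatMap]
  simp only [List.foldl_map]
  rfl

lemma pv_hstepY (d1 : PySem.Dict Int (PySem.Dict Int (PySem.Dict Int String)))
    (yp : Int × List (Int × List (Int × String))) (h : d1.contains yp.1 = false) :
    pvStepY d1 yp = if (pvPairsT yp.2).isEmpty then d1 else d1.insert yp.1 (pvGZ yp) := by
  rw [pv_stepY_flat]
  cases hT : pvPairsT yp.2 with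
  | nil => simp
  | cons t0 ts =>
      rw [pv_foldl_modify _ _
        (fun t d2 => d2.modify t.1 PySem.Dict.empty (fun d3 => d3.insert t.2.1 t.2.2)) ts t0 d1,
        pv_modify_fresh _ _ _ _ h]
      simp only [List.isEmpty_cons, Bool.false_eq_true, if_false]
      congr 1
      have := pv_unflatZ yp.2 PySem.Dict.empty
      rw [pvGZ, ← this, hT]
      simp [List.foldl]

lemma pv_loopY_flat (ns : PySem.Dict Int (PySem.Dict Int (PySem.Dict Int (PySem.Dict Int String))))
    (xp : Int × List (Int × List (Int × List (Int × String)))) :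
    pvA_loopY ns xp = (pvTriT xp.2).foldl (fun ns t =>
      ns.modify xp.1 PySem.Dict.empty (fun d1 =>
        d1.modify t.1 PySem.Dict.empty (fun d2 =>
          d2.modify t.2.1 PySem.Dict.empty (fun d3 => d3.insert t.2.2.1 t.2.2.2)))) ns := by
  rw [pvTriT, List.foldl_flatMap]
  simp only [List.foldl_flatMap, List.foldl_map]
  rfl

lemma pv_unflatY (xv : List (Int × List (Int × List (Int × String))))
    (d0 : PySem.Dict Int (PySem.Dict Int (PySem.Dict Int String))) :
    (pvTriT xv).foldl (fun d1 t =>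
      d1.modify t.1 PySem.Dict.empty (fun d2 =>
        d2.modify t.2.1 PySem.Dict.empty (fun d3 => d3.insert t.2.2.1 t.2.2.2))) d0
      = xv.foldl pvStepY d0 := by
  rw [pvTriT, List.foldl_flatMap]
  simp only [List.foldl_flatMap, List.foldl_map]
  rfl

lemma pv_hstepX (ns : PySem.Dict Int (PySem.Dict Int (PySem.Dict Int (PySem.Dict Int String))))
    (xp : Int × List (Int × List (Int × List (Int × String)))) (h : ns.contains xp.1 = false) :
    pvA_loopY ns xp = if (pvTriT xp.2).isEmpty then ns else ns.insert xp.1 (pvGY xp) := by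
  rw [pv_loopY_flat]
  cases hT : pvTriT xp.2 with
  | nil => simp
  | cons t0 ts =>
      rw [pv_foldl_modify _ _
        (fun t d1 => d1.modify t.1 PySem.Dict.empty (fun d2 =>
          d2.modify t.2.1 PySem.Dict.empty (fun d3 => d3.insert t.2.2.1 t.2.2.2))) ts t0 ns,
        pv_modify_fresh _ _ _ _ h]
      simp only [List.isEmpty_cons, Bool.false_eq_true, if_false]
      congr 1
      have := pv_unflatY xp.2 PySem.Dict.empty
      rw [pvGY, ← this, hT]
      simp [List.foldl]

lemma pv_items_empty {ν : Type} : (PySem.Dict.empty : PySem.Dict Int ν).items = [] := by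
  simp [PySem.Dict.empty]

lemma pv_IW (zp : Int × List (Int × String)) (hnd : (zp.2.map Prod.fst).Nodup) :
    (pvGW zp).items = zp.2 := by
  rw [pvGW, pv_gen_fold (fun _ => false) (fun wp => wp.2)
    (fun d wp => d.insert wp.1 wp.2) (fun ns p _ => by simp) zp.2 PySem.Dict.empty hnd
    (fun p _ => PySem.Dict.contains_empty p.1)]
  simp [pv_items_empty]

lemma pv_IZ (yv : List (Int × List (Int × String))) (hnd : (yv.map Prod.fst).Nodup)
    (hin : ∀ zp ∈ yv, (zp.2.map Prod.fst).Nodup) :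
    ((yv.foldl pvStepZ PySem.Dict.empty).items.map (fun zp => (zp.1, zp.2.items)))
      = pvCopyDepth2 yv := by
  rw [pv_gen_fold (fun zp => zp.2.isEmpty) pvGW pvStepZ pv_hstepZ yv PySem.Dict.empty hnd
    (fun p _ => PySem.Dict.contains_empty p.1), pv_items_empty, List.nil_append,
    List.map_filterMap, pvCopyDepth2, pv_foldl_filterMap, List.nil_append]
  apply List.filterMap_congr
  intro zp hzp
  cases hz : zp.2 with
  | nil => simp [pvCopyDepth1]
  | cons w ws =>
      have := pv_IW zp (hin zp hzp)
      simp [pvCopyDepth1, hz ▸ this]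

lemma pv_pairsT_nil_iff (yv : List (Int × List (Int × String))) :
    (pvPairsT yv = []) ↔ pvCopyDepth2 yv = [] := by
  rw [pvPairsT, pvCopyDepth2, pv_foldl_filterMap, List.nil_append,
    List.flatMap_eq_nil_iff, List.filterMap_eq_nil_iff]
  constructor
  · intro h zp hzp
    have := h zp hzp
    simp only [List.map_eq_nil_iff] at this
    simp [pvCopyDepth1, this]
  · intro h zp hzp
    have := h zp hzp
    by_cases hz : zp.2 = [] <;> simp_all [pvCopyDepth1]

lemma pv_IY (xv : List (Int × List (Int × List (Int × String)))) (hnd : (xv.map Prod.fst).Nodup)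
    (hin : ∀ yp ∈ xv, (yp.2.map Prod.fst).Nodup ∧ ∀ zp ∈ yp.2, (zp.2.map Prod.fst).Nodup) :
    ((xv.foldl pvStepY PySem.Dict.empty).items.map
      (fun yp => (yp.1, yp.2.items.map (fun zp => (zp.1, zp.2.items)))))
      = pvCopyDepth3 xv := by
  rw [pv_gen_fold (fun yp => (pvPairsT yp.2).isEmpty) pvGZ pvStepY pv_hstepY xv PySem.Dict.empty
    hnd (fun p _ => PySem.Dict.contains_empty p.1), pv_items_empty, List.nil_append,
    List.map_filterMap, pvCopyDepth3, pv_foldl_filterMap, List.nil_append]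
  apply List.filterMap_congr
  intro yp hyp
  have hz := pv_IZ yp.2 (hin yp hyp).1 (hin yp hyp).2
  by_cases hc : pvPairsT yp.2 = []
  · have : pvCopyDepth2 yp.2 = [] := (pv_pairsT_nil_iff yp.2).mp hc
    simp [hc, this]
  · have : ¬ pvCopyDepth2 yp.2 = [] := fun h => hc ((pv_pairsT_nil_iff yp.2).mpr h)
    simp only [List.isEmpty_iff, hc, if_false, this, Option.map_some]
    rw [pvGZ, hz]

lemma pv_triT_nil_iff (xv : List (Int × List (Int × List (Int × String)))) :
    (pvTriT xv = []) ↔ pvCopyDepth3 xv = [] := by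
  rw [pvTriT, pvCopyDepth3, pv_foldl_filterMap, List.nil_append,
    List.flatMap_eq_nil_iff, List.filterMap_eq_nil_iff]
  constructor
  · intro h yp hyp
    have : pvPairsT yp.2 = [] := by
      rw [pvPairsT]
      rw [List.flatMap_eq_nil_iff]
      intro zp hzp
      have := h yp hyp
      rw [List.flatMap_eq_nil_iff] at this
      simpa using this zp hzp
    simp [(pv_pairsT_nil_iff yp.2).mp this]
  · intro h yp hyp
    have h2 : pvCopyDepth2 yp.2 = [] := by
      have := h yp hyp
      by_cases hz : pvCopyDepth2 yp.2 = [] <;> simp_all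
    have : pvPairsT yp.2 = [] := (pv_pairsT_nil_iff yp.2).mpr h2
    rw [pvPairsT, List.flatMap_eq_nil_iff] at this
    rw [List.flatMap_eq_nil_iff]
    intro zp hzp
    simpa using this zp hzp

-- ===== VERDICT (by name: the statement is the Claim_ definition above) =====
theorem copy_state_4d_py_spec : Claim_equal_copy_state_4d_py := by
  intro fs _ hpre
  unfold Spec_copy_state_4d_py copy_state_4d_py copy_state_4d_py_alt
  rw [pv_gen_fold (fun xp => (pvTriT xp.2).isEmpty) pvGY pvA_loopY pv_hstepX fs PySem.Dict.empty
    hpre.1 (fun p _ => PySem.Dict.contains_empty p.1), pv_items_empty, List.nil_append,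
    List.map_filterMap, pvCopyDepth4, pv_foldl_filterMap, List.nil_append]
  apply List.filterMap_congr
  intro xp hxp
  have hy := pv_IY xp.2 (hpre.2 xp hxp).1 (hpre.2 xp hxp).2
  by_cases hc : pvTriT xp.2 = []
  · have : pvCopyDepth3 xp.2 = [] := (pv_triT_nil_iff xp.2).mp hc
    simp [hc, this]
  · have : ¬ pvCopyDepth3 xp.2 = [] := fun h => hc ((pv_triT_nil_iff xp.2).mpr h)
    simp only [List.isEmpty_iff, hc, if_false, if_neg this, Option.map_some]
    rw [pvGY, hy]
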